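-- pv_equiv track=rewrite | github.com/techkaduna/sabi | sabi.py | search_for_word
-- ===== SOURCE A (Python) =====
-- def search_for_word(word: str, source: dict | None) -> str:
--     """Search for a word in a dictonary where the keys are tuples.
--
--     Parameters
--     --------------
--     word: str
--         Word to search for in the dictionary.
--     source: dict
--         Source from which word is to be searched.
--
--     return:
--         word: str
--     """
--
--     if source is None or type(source) is not dict:
--         raise TypeError(f"source expected type dict but got type {type(source)}")
--
--     # will handle this later
--     # punctuations = [".", ",", ":", ";", "?", "!"]
--     # is_endswith_symbol = [word.endswith(i) for i in punctuations]
--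
--     word_tup = [i for i in list(source.keys())]
--     for tup in word_tup:
--         if word.lower() in tup:
--             _translation = source[tup]
--             return _translation
--     else:
--         return word
-- ===== SOURCE B (Python) =====
-- def search_for_word(word: str, source: dict | None) -> str:
--     if source is None or type(source) is not dict:
--         raise TypeError(f"source expected type dict but got type {type(source)}")
--
--     index = {}
--     for tup, translation in source.items():
--         for w in tup:
--             index.setdefault(w, translation)
--     return index.get(word.lower(), word)
-- ===== Notes on version B (the rewrite author's own statement) =====
-- stated objective: faster
-- what changed: Replaces the per-call scan over tuple keys (recomputing word.lower() and a tuple-membership test per key) with a flat word-to-translation index built once via setdefault (first occurrence wins) and a single dict lookup with the word as default.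
import Mathlib
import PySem

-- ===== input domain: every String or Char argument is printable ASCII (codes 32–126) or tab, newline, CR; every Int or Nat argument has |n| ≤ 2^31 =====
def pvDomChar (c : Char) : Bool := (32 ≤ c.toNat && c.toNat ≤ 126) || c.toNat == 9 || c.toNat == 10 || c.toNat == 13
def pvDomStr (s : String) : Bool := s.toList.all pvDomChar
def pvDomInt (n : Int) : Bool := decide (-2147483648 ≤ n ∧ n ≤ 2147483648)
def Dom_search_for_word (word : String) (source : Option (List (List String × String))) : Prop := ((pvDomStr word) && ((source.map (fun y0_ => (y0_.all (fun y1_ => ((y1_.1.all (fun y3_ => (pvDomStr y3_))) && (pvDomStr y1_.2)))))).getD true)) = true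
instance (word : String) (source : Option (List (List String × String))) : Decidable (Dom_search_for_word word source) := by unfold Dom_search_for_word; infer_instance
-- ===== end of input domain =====

-- B builds a flat word→translation index once (first occurrence wins) and does one lookup,
-- instead of A's scan over tuple keys; alternative data-structure decomposition, same results.


-- ===== PORT A =====
-- first-match lookup source[tup] (dict → assoc list, lookup = first match); default never reached
def pvLookupA (word : String) (tup : List String) : List (List String × String) → String
  | [] => word
  | (k, v) :: rest => if k == tup then v else pvLookupA word tup rest

-- the 'for tup in word_tup' loop; src is the whole source for the source[tup] lookup
def pvScanA (word wl : String) (src : List (List String × String)) : List (List String × String) → String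
  | [] => word
  | (tup, _) :: rest => if tup.contains wl then pvLookupA word tup src else pvScanA word wl src rest

def search_for_word (word : String) (source : Option (List (List String × String))) : String :=
  match source with
  | none => word   -- A raises TypeError here; excluded by Pre_
  | some src => pvScanA word (PySem.Str.lower word) src src

-- ===== PORT B =====
def pvIndexB (src : List (List String × String)) : PySem.Dict String String :=
  src.foldl (fun d p => p.1.foldl (fun d w => d.setdefault w p.2) d) PySem.Dict.empty

def search_for_word_alt (word : String) (source : Option (List (List String × String))) : String :=
  match source with
  | none => word   -- B raises TypeError here; excluded by Pre_
  | some src => (pvIndexB src).getD (PySem.Str.lower word) word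

-- ===== PRECONDITION & SPEC =====
-- A (and B) raise TypeError when source is None; nothing else raises.
def Pre_search_for_word (word : String) (source : Option (List (List String × String))) : Prop :=
  source ≠ none
instance (word : String) (source : Option (List (List String × String))) : Decidable (Pre_search_for_word word source) := by unfold Pre_search_for_word; infer_instance

def pvWitness_search_for_word : String × (Option (List (List String × String))) :=
  ("Hello", some [(["hello", "hi"], "sannu"), (["bye"], "sai anjima")])

def Spec_search_for_word (word : String) (source : Option (List (List String × String))) (out : String) : Prop := out = search_for_word_alt word source
instance (word : String) (source : Option (List (List String × String))) (out : String) : Decidable (Spec_search_for_word word source out) := by unfold Spec_search_for_word; infer_instance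

-- ===== CLAIM (what is proved, stated in full; the proofs are below) =====
def Claim_equal_search_for_word : Prop := ∀ (word : String) (source : Option (List (List String × String))), Dom_search_for_word word source → Pre_search_for_word word source → Spec_search_for_word word source (search_for_word word source)

-- ===== LEMMAS AND PROOFS =====

-- reference value: translation of the first pair whose tuple contains wl, else word
def pvRef (word wl : String) : List (List String × String) → String
  | [] => word
  | (tup, v) :: rest => if tup.contains wl then v else pvRef word wl rest

-- A-side: scanning the suffix while the prefix has no tuple containing wl gives the reference value
theorem pvScanA_eq_ref (word wl : String) (pre rest : List (List String × String))
    (hpre : ∀ p ∈ pre, p.1.contains wl = false) :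
    pvScanA word wl (pre ++ rest) rest = pvRef word wl rest := by
  induction rest generalizing pre with
  | nil => rfl
  | cons hd tl ih =>
    obtain ⟨tup, v⟩ := hd
    by_cases h : tup.contains wl
    · simp only [pvScanA, pvRef, h, if_pos]
      -- no pair in pre has key tup (its key would contain wl)
      have : pvLookupA word tup (pre ++ (tup, v) :: tl) = pvLookupA word tup ((tup, v) :: tl) := by
        induction pre with
        | nil => rfl
        | cons q qs ihq =>
          have hq : q.1.contains wl = false := hpre q (by simp)
          have hne : (q.1 == tup) = false := by
            apply beq_eq_false_iff_ne.mpr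
            intro he; rw [he, h] at hq; exact absurd hq (by decide)
          simp only [List.cons_append, pvLookupA, hne, if_neg Bool.false_ne_true]
          exact ihq (fun p hp => hpre p (List.mem_cons_of_mem _ hp))
      rw [this]
      simp [pvLookupA]
    · simp only [pvScanA, pvRef, h, if_neg Bool.false_ne_true]
      have := ih (pre ++ [(tup, v)]) (by
        intro p hp
        rcases List.mem_append.mp hp with h1 | h2
        · exact hpre p h1
        · simp at h2; subst h2; simpa using h)
      simpa using this

-- inner loop: contains after folding setdefault over a tuple
theorem contains_foldl_setdefault (wl v : String) (k : List String) (d : PySem.Dict String String) :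
    (k.foldl (fun d w => d.setdefault w v) d).contains wl = (d.contains wl || k.contains wl) := by
  induction k generalizing d with
  | nil => simp
  | cons w ws ih =>
    simp only [List.foldl_cons, List.contains_cons, ih]
    by_cases hc : d.contains w
    · rw [PySem.Dict.setdefault_of_contains _ _ hc]
      by_cases he : wl == w
      · have : wl = w := eq_of_beq he
        subst this
        simp [hc]
      · simp [he]
    · rw [PySem.Dict.setdefault_of_not_contains _ _ (by simpa using hc)]
      by_cases he : wl = w
      · subst he
        simp [PySem.Dict.contains_insert_self]
      · rw [PySem.Dict.contains_insert]
        have : (wl == w) = false := beq_eq_false_iff_ne.mpr he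
        simp [this]

-- inner loop: getD after folding setdefault over a tuple
theorem getD_foldl_setdefault (word wl v : String) (k : List String) (d : PySem.Dict String String) :
    (k.foldl (fun d w => d.setdefault w v) d).getD wl word =
      if d.contains wl then d.getD wl word else if k.contains wl then v else word := by
  induction k generalizing d with
  | nil =>
    by_cases hc : d.contains wl
    · simp [hc]
    · simp [hc, PySem.Dict.getD_of_not_contains _ _ (by simpa using hc)]
  | cons w ws ih =>
    simp only [List.foldl_cons, ih, List.contains_cons]
    by_cases hc : d.contains w
    · rw [PySem.Dict.setdefault_of_contains _ _ hc]
      by_cases he : wl = w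
      · subst he; simp [hc]
      · have hb : (wl == w) = false := beq_eq_false_iff_ne.mpr he
        simp [hb]
    · rw [PySem.Dict.setdefault_of_not_contains _ _ (by simpa using hc)]
      by_cases he : wl = w
      · subst he
        simp [PySem.Dict.contains_insert_self, PySem.Dict.getD_insert_self,
              (by simpa using hc : d.contains wl = false)]
      · have hb : (wl == w) = false := beq_eq_false_iff_ne.mpr he
        rw [PySem.Dict.contains_insert, PySem.Dict.getD_insert_of_ne _ _ _ he]
        simp [hb]

-- outer loop of B equals the reference value
theorem pvIndexB_fold_getD (word wl : String) (src : List (List String × String))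
    (d : PySem.Dict String String) :
    (src.foldl (fun d p => p.1.foldl (fun d w => d.setdefault w p.2) d) d).getD wl word =
      if d.contains wl then d.getD wl word else pvRef word wl src := by
  induction src generalizing d with
  | nil =>
    by_cases hc : d.contains wl
    · simp [hc]
    · simp [hc, pvRef, PySem.Dict.getD_of_not_contains _ _ (by simpa using hc)]
  | cons p ps ih =>
    obtain ⟨k, v⟩ := p
    simp only [List.foldl_cons, ih, contains_foldl_setdefault, getD_foldl_setdefault, pvRef]
    by_cases hc : d.contains wl
    · simp [hc]
    · have hc' : d.contains wl = false := by simpa using hc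
      simp only [hc']
      simp only [Bool.false_or, Bool.false_eq_true, if_false]
      split_ifs <;> rfl

-- ===== VERDICT (by name: the statement is the Claim_ definition above) =====
theorem search_for_word_spec : Claim_equal_search_for_word := by
  intro word source _ hpre
  unfold Spec_search_for_word
  match source with
  | none => exact absurd rfl hpre
  | some src =>
    simp only [search_for_word, search_for_word_alt, pvIndexB]
    rw [pvIndexB_fold_getD word (PySem.Str.lower word) src PySem.Dict.empty]
    simp only [PySem.Dict.contains_empty, if_neg Bool.false_ne_true]
    exact pvScanA_eq_ref word (PySem.Str.lower word) [] src (by simp)
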